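-- pv_equiv track=rewrite | github.com/KovaliovNA/baconian-cipher | baconian-cipher.py | hide_cipher
-- ===== SOURCE A (Python) =====
-- def letters_count(text):
--     count = 0
--
--     for letter in text:
--         if letter.isalpha():
--             count += 1
--
--     return count
--
-- def hide_cipher(data, encrypted_message):
--     if letters_count(data) >= letters_count(encrypted_message) + 5:
--
--         list_data = list(data)
--         list_encrypted_message = list(encrypted_message)
--
--         iter_encr_mes = 0
--         iter_data_from_file = 0
--
--         while iter_encr_mes <= len(list_encrypted_message) - 1:
--
--             if list_data[iter_data_from_file].isalpha():
--                 if list_encrypted_message[iter_encr_mes].isalpha():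
--                     if list_encrypted_message[iter_encr_mes].lower() == 'a':
--                         list_data[iter_data_from_file] = list_data[iter_data_from_file].lower()
--                     else:
--                         list_data[iter_data_from_file] = list_data[iter_data_from_file].upper()
--                 iter_encr_mes += 1
--
--             iter_data_from_file += 1
--
--         number_of_last_letters = 0
--
--         while number_of_last_letters != 5:
--             if list_data[iter_data_from_file].isalpha():
--                 list_data[iter_data_from_file] = list_data[iter_data_from_file].upper()
--                 number_of_last_letters += 1
--
--             iter_data_from_file += 1
--
--         return ''.join(list_data)
--     else:
--         return None
-- ===== SOURCE B (Python) =====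
-- def letters_count(text):
--     return sum(1 for c in text if c.isalpha())
--
-- def hide_cipher(data, encrypted_message):
--     if letters_count(data) < letters_count(encrypted_message) + 5:
--         return None
--     # precompute the case operation each consumed alpha of data receives
--     ops = [('l' if e.lower() == 'a' else 'u') if e.isalpha() else 'k'
--            for e in encrypted_message] + ['u'] * 5
--     out = []
--     j = 0
--     for ch in data:
--         if ch.isalpha() and j < len(ops):
--             op = ops[j]
--             j += 1
--             out.append(ch.lower() if op == 'l' else ch.upper() if op == 'u' else ch)
--         else:
--             out.append(ch)
--     return ''.join(out)
-- ===== Notes on version B (the rewrite author's own statement) =====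
-- stated objective: simpler
-- what changed: Replaces A's two cursor-driven while loops over a mutable char list with a precomputed list of case operations (one per message char, plus five uppercases) applied in a single pass over data.
import Mathlib
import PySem

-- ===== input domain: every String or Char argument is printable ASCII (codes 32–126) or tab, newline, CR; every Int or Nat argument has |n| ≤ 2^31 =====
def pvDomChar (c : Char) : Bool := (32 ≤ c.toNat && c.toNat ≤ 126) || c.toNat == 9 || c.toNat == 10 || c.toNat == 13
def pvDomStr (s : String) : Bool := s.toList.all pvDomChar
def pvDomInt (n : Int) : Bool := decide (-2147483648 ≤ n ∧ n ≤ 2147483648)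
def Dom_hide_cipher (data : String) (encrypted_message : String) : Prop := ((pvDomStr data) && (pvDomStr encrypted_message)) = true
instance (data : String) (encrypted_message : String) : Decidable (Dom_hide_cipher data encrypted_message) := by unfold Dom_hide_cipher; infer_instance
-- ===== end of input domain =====

-- B replaces A's two cursor-driven while loops by a precomputed list of case
-- operations applied in one pass over data (simpler decomposition; return value only).

-- ===== PORT A =====
-- letters_count: counting loop with an accumulator
def lettersCountA (text : List Char) : Nat :=
  text.foldl (fun count letter => if PySem.Chars.isalpha letter then count + 1 else count) 0

-- A's first while loop: walks data, consuming one encrypted_message char per alpha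
-- data char; none = IndexError (data exhausted). Returns (transformed prefix, rest).
def loopA1 : List Char → List Char → Option (List Char × List Char)
  | rest, [] => some ([], rest)
  | [], _ :: _ => none
  | c :: cs, e :: es =>
    if PySem.Chars.isalpha c then
      (fun pr => ((if PySem.Chars.isalpha e then
                     (if PySem.Chars.lowerChar e = 'a' then PySem.Chars.lowerChar c
                      else PySem.Chars.upperChar c)
                   else c) :: pr.1, pr.2)) <$> loopA1 cs es
    else
      (fun pr => (c :: pr.1, pr.2)) <$> loopA1 cs (e :: es)

-- A's second while loop: uppercase the next 5 alpha chars; none = IndexError.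
def loopA2 (rest : List Char) (n : Nat) : Option (List Char) :=
  if n = 5 then some rest
  else
    match rest with
    | [] => none
    | c :: cs =>
      if PySem.Chars.isalpha c then
        (fun q => PySem.Chars.upperChar c :: q) <$> loopA2 cs (n + 1)
      else
        (fun q => c :: q) <$> loopA2 cs n

def hide_cipher (data : String) (encrypted_message : String) : Option String :=
  if lettersCountA data.toList ≥ lettersCountA encrypted_message.toList + 5 then
    match loopA1 data.toList encrypted_message.toList with
    | none => none
    | some (p, r) =>
      match loopA2 r 0 with
      | none => none
      | some q => some (String.ofList (p ++ q))
  else none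

-- ===== PORT B =====
inductive Op
  | low | up | keep
deriving DecidableEq, Repr

def opOfChar (e : Char) : Op :=
  if PySem.Chars.isalpha e then
    (if PySem.Chars.lowerChar e = 'a' then Op.low else Op.up)
  else Op.keep

def applyOp (o : Op) (c : Char) : Char :=
  match o with
  | Op.low => PySem.Chars.lowerChar c
  | Op.up => PySem.Chars.upperChar c
  | Op.keep => c

-- B's single pass: each alpha char of data consumes the next pending operation.
def applyOps : List Char → List Op → List Char
  | [], _ => []
  | c :: cs, ops =>
    if PySem.Chars.isalpha c then
      match ops with
      | [] => c :: applyOps cs []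
      | o :: os => applyOp o c :: applyOps cs os
    else c :: applyOps cs ops

def hide_cipher_alt (data : String) (encrypted_message : String) : Option String :=
  if data.toList.countP PySem.Chars.isalpha <
      encrypted_message.toList.countP PySem.Chars.isalpha + 5 then none
  else
    some (String.ofList (applyOps data.toList
      (encrypted_message.toList.map opOfChar ++ List.replicate 5 Op.up)))

-- ===== PRECONDITION & SPEC =====
-- Pre_ excludes exactly the inputs on which A raises IndexError: the guard passes
-- but data has fewer than len(encrypted_message) + 5 alphabetic characters.
def Pre_hide_cipher (data : String) (encrypted_message : String) : Prop :=
  data.toList.countP PySem.Chars.isalpha <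
      encrypted_message.toList.countP PySem.Chars.isalpha + 5
  ∨ encrypted_message.toList.length + 5 ≤ data.toList.countP PySem.Chars.isalpha

instance (data : String) (encrypted_message : String) : Decidable (Pre_hide_cipher data encrypted_message) := by
  unfold Pre_hide_cipher; infer_instance

def pvWitness_hide_cipher : String × String := ("hello world", "ab?")

def Spec_hide_cipher (data : String) (encrypted_message : String) (out : Option String) : Prop := out = hide_cipher_alt data encrypted_message
instance (data : String) (encrypted_message : String) (out : Option String) : Decidable (Spec_hide_cipher data encrypted_message out) := by unfold Spec_hide_cipher; infer_instance

-- ===== CLAIM (what is proved, stated in full; the proofs are below) =====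
def Claim_equal_hide_cipher : Prop := ∀ (data : String) (encrypted_message : String), Dom_hide_cipher data encrypted_message → Pre_hide_cipher data encrypted_message → Spec_hide_cipher data encrypted_message (hide_cipher data encrypted_message)


-- ===== LEMMAS AND PROOFS =====
theorem lettersCountA_go (l : List Char) (n : Nat) :
    l.foldl (fun count letter => if PySem.Chars.isalpha letter then count + 1 else count) n
      = n + l.countP PySem.Chars.isalpha := by
  induction l generalizing n with
  | nil => simp
  | cons c cs ih =>
    simp only [List.foldl_cons, List.countP_cons, ih]
    by_cases h : PySem.Chars.isalpha c <;> simp [h] <;> try omega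

theorem lettersCountA_eq (l : List Char) :
    lettersCountA l = l.countP PySem.Chars.isalpha := by
  simpa using lettersCountA_go l 0

theorem applyOps_nil (l : List Char) : applyOps l [] = l := by
  induction l with
  | nil => rfl
  | cons c cs ih => by_cases h : PySem.Chars.isalpha c <;> simp [applyOps, h, ih]

theorem loopA1_spec (rest : List Char) : ∀ (em : List Char),
    em.length ≤ rest.countP PySem.Chars.isalpha →
    ∃ p r, loopA1 rest em = some (p, r)
      ∧ rest.countP PySem.Chars.isalpha = em.length + r.countP PySem.Chars.isalpha
      ∧ ∀ tail, applyOps rest (em.map opOfChar ++ tail) = p ++ applyOps r tail := by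
  induction rest with
  | nil =>
    intro em hlen
    have : em = [] := by
      cases em with
      | nil => rfl
      | cons e es => simp at hlen
    subst this
    exact ⟨[], [], rfl, by simp, fun tail => by simp [applyOps]⟩
  | cons c cs ih =>
    intro em hlen
    cases em with
    | nil =>
      exact ⟨[], c :: cs, rfl, by simp, fun tail => by simp⟩
    | cons e es =>
      by_cases hc : PySem.Chars.isalpha c
      · have hlen' : es.length ≤ cs.countP PySem.Chars.isalpha := by
          simp [hc] at hlen ⊢; omega
        obtain ⟨p, r, heq, hcnt, happ⟩ := ih es hlen'
        refine ⟨(if PySem.Chars.isalpha e then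
                   (if PySem.Chars.lowerChar e = 'a' then PySem.Chars.lowerChar c
                    else PySem.Chars.upperChar c)
                 else c) :: p, r, ?_, ?_, ?_⟩
        · simp [loopA1, hc, heq]
        · simp [hc, hcnt]; omega
        · intro tail
          have : applyOp (opOfChar e) c =
              (if PySem.Chars.isalpha e then
                 (if PySem.Chars.lowerChar e = 'a' then PySem.Chars.lowerChar c
                  else PySem.Chars.upperChar c)
               else c) := by
            by_cases he : PySem.Chars.isalpha e
            · by_cases ha : PySem.Chars.lowerChar e = 'a' <;> simp [opOfChar, applyOp, he, ha]
            · simp [opOfChar, applyOp, he]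
          simp [applyOps, hc, happ tail, this]
      · have hlen' : (e :: es).length ≤ cs.countP PySem.Chars.isalpha := by
          simpa [List.countP_cons, hc] using hlen
        obtain ⟨p, r, heq, hcnt, happ⟩ := ih (e :: es) hlen'
        refine ⟨c :: p, r, ?_, ?_, fun tail => ?_⟩
        · simp [loopA1, hc, heq]
        · simp [hc, hcnt]
        · have h := happ tail
          simp only [List.map_cons, List.cons_append] at h
          simp [applyOps, hc, h]

theorem loopA2_spec (rest : List Char) : ∀ (n : Nat),
    n ≤ 5 → 5 - n ≤ rest.countP PySem.Chars.isalpha →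
    loopA2 rest n = some (applyOps rest (List.replicate (5 - n) Op.up)) := by
  induction rest with
  | nil =>
    intro n hn hcnt
    have h5 : n = 5 := by simp at hcnt; omega
    subst h5
    simp [loopA2, applyOps_nil]
  | cons c cs ih =>
    intro n hn hcnt
    by_cases h5 : n = 5
    · subst h5; simp [loopA2, applyOps_nil]
    · by_cases hc : PySem.Chars.isalpha c
      · have hcnt' : 5 - (n + 1) ≤ cs.countP PySem.Chars.isalpha := by
          simp [hc] at hcnt ⊢; omega
        have hrepl : 5 - n = (5 - (n + 1)) + 1 := by omega
        rw [hrepl, List.replicate_succ]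
        simp [loopA2, h5, hc, applyOps, applyOp, ih (n + 1) (by omega) hcnt']
      · have hcnt' : 5 - n ≤ cs.countP PySem.Chars.isalpha := by
          simpa [List.countP_cons, hc] using hcnt
        simp [loopA2, h5, hc, applyOps, ih n hn hcnt']

-- ===== VERDICT (by name: the statement is the Claim_ definition above) =====
theorem hide_cipher_spec : Claim_equal_hide_cipher := by
  intro data em _ hPre
  show hide_cipher data em = hide_cipher_alt data em
  unfold hide_cipher hide_cipher_alt
  rw [lettersCountA_eq, lettersCountA_eq]
  by_cases hg : em.toList.countP PySem.Chars.isalpha + 5 ≤ data.toList.countP PySem.Chars.isalpha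
  · have hlen : em.toList.length + 5 ≤ data.toList.countP PySem.Chars.isalpha := by
      rcases hPre with h | h
      · omega
      · exact h
    obtain ⟨p, r, heq, hcnt, happ⟩ := loopA1_spec data.toList em.toList (by omega)
    have hr5 : 5 ≤ r.countP PySem.Chars.isalpha := by omega
    have h2 := loopA2_spec r 0 (by omega) (by omega)
    simp only [ge_iff_le, hg, if_true, heq]
    norm_num at h2
    rw [h2]
    rw [if_neg (by omega)]
    rw [happ (List.replicate 5 Op.up)]
  · simp only [ge_iff_le, hg, if_false]
    rw [if_pos (by omega)]
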